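-- pv_equiv track=rewrite | github.com/Nghia03092004/nghia03092004.github.io | project_euler_unified/problem_814/solution.py | menage
-- ===== SOURCE A (Python) =====
-- from math import factorial
--
-- def menage(n):
--     """Compute the menage number M_n: circular permutations of {1..n}
--     where no element i is adjacent to element i+1 (mod n)."""
--     if n < 3:
--         return 0
--     # M_n = n/2 * sum_{k=0}^{n} (-1)^k * 2n/(2n-k) * C(2n-k, k) * (n-k)!
--     # Using the Touchard formula
--     total = 0
--     for k in range(n + 1):
--         if 2*n - k == 0:
--             continue
--         coeff = 2 * n * factorial(2*n - k - 1) // (factorial(k) * factorial(2*n - 2*k))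
--         term = coeff * factorial(n - k)
--         if k % 2 == 0:
--             total += term
--         else:
--             total -= term
--     return total
-- ===== SOURCE B (Python) =====
-- def menage(n):
--     """Compute the menage number M_n: circular permutations of {1..n}
--     where no element i is adjacent to element i+1 (mod n)."""
--     if n < 3:
--         return 0
--     if n == 3:
--         return 1
--     # Linear recurrence M_i = i*M_{i-1} + 2*M_{i-2} - (i-4)*M_{i-3} - M_{i-4}
--     # for i >= 5, seeded with the window of the four preceding menage values
--     # (the first two of which are virtual); a rolling window of four values
--     # replaces the factorial series entirely.
--     a1, a2, a3, a4 = -1, 0, 1, 2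
--     for i in range(5, n + 1):
--         a1, a2, a3, a4 = a2, a3, a4, i*a4 + 2*a3 - (i-4)*a2 - a1
--     return a4
-- ===== Notes on version B (the rewrite author's own statement) =====
-- stated objective: faster
-- what changed: Replaced the Touchard factorial series (a sum over k with three big factorials and an exact division per term) by the order-4 linear recurrence M_i = i*M_{i-1} + 2*M_{i-2} - (i-4)*M_{i-3} - M_{i-4} iterated with a rolling window of four values.
import Mathlib
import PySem

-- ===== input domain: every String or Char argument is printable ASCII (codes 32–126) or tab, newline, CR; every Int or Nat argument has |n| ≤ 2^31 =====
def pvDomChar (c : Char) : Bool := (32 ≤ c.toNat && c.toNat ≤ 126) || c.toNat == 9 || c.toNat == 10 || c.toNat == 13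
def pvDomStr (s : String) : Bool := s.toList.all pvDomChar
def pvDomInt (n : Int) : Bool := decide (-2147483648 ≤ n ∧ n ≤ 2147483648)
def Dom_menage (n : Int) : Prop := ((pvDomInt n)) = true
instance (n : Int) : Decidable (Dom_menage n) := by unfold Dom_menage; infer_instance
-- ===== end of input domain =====

-- B replaces A's Touchard factorial series by the order-4 linear recurrence
-- M_i = i*M_{i-1} + 2*M_{i-2} - (i-4)*M_{i-3} - M_{i-4} with a rolling window of four values.


-- ===== PORT A =====
-- math.factorial; exact for m ≥ 0, which holds at every call site reached (n ≥ 3, 0 ≤ k ≤ n)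
def pyfac (m : Int) : Int := (Nat.factorial m.toNat : Int)

def menage (n : Int) : Int :=
  if n < 3 then 0
  else
    (PySem.List.pyRange 0 (n + 1) 1).foldl (fun total k =>
      if 2 * n - k = 0 then total
      else
        let coeff := PySem.Int.floordiv (2 * n * pyfac (2 * n - k - 1))
                       (pyfac k * pyfac (2 * n - 2 * k))
        let term := coeff * pyfac (n - k)
        if PySem.Int.mod k 2 = 0 then total + term else total - term) 0

-- ===== PORT B =====
def menage_alt (n : Int) : Int :=
  if n < 3 then 0
  else if n = 3 then 1
  else
    ((PySem.List.pyRange 5 (n + 1) 1).foldl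
      (fun (st : Int × Int × Int × Int) i =>
        (st.2.1, st.2.2.1, st.2.2.2,
         i * st.2.2.2 + 2 * st.2.2.1 - (i - 4) * st.2.1 - st.1))
      (-1, 0, 1, 2)).2.2.2

-- ===== PRECONDITION & SPEC =====
def Spec_menage (n : Int) (out : Int) : Prop := out = menage_alt n
instance (n : Int) (out : Int) : Decidable (Spec_menage n out) := by unfold Spec_menage; infer_instance

-- ===== CLAIM (what is proved, stated in full; the proofs are below) =====
def Claim_equal_menage : Prop := ∀ (n : Int), Dom_menage n → Spec_menage n (menage n)

-- ===== LEMMAS AND PROOFS =====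

-- the Touchard term, division-free: mC n k = 2n/(2n-k) * C(2n-k,k) as a sum of binomials
def mC (n k : Nat) : Nat :=
  Nat.choose (2*n - k) k + (if 0 < k then Nat.choose (2*n - k - 1) (k - 1) else 0)

def mTerm (n k : Nat) : Int := (-1)^k * (mC n k : Int) * (Nat.factorial (n - k) : Int)

def mT (n : Nat) : Int := ∑ k ∈ Finset.range (n+1), mTerm n k

-- B's recurrence, with virtual seed values at the two indices below three
def G : Nat → Int
  | 0 => 0
  | 1 => -1
  | 2 => 0
  | 3 => 1
  | 4 => 2
  | (j+5) => ((j:Int)+5) * G (j+4) + 2 * G (j+3) - ((j:Int)+1) * G (j+2) - G (j+1)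

-- Zeilberger-style certificate term for the order-2 recurrence
def sQ (n k : Nat) : ℚ :=
  (-1)^k * (2*(n:ℚ)*((n:ℚ)-2)*(k:ℚ)*((k:ℚ)^2-(2*(n:ℚ)+2)*(k:ℚ)+6*(n:ℚ)-5))
    * (Nat.factorial (2*n - k - 4) : ℚ) * (Nat.factorial (n - k) : ℚ)
    / ((Nat.factorial k : ℚ) * (Nat.factorial (2*n - 2*k) : ℚ))

def tQ (n k : Nat) : ℚ := ((mTerm n k : Int) : ℚ)

-- key coefficient identity: 2n·(2n-k-1)! = mC n k · (k!·(2n-2k)!)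
theorem menage_coeff_key (n k : Nat) (h1 : 1 ≤ n) (hk : k ≤ n) :
    2 * n * Nat.factorial (2 * n - k - 1) =
      (mC n k) * (Nat.factorial k * Nat.factorial (2 * n - 2 * k)) := by
  unfold mC
  have hfac : Nat.factorial (2 * n - k) = (2 * n - k) * Nat.factorial (2 * n - k - 1) := by
    conv_lhs => rw [show 2 * n - k = (2 * n - k - 1) + 1 from by omega]
    rw [Nat.factorial_succ]
    congr 1
    omega
  have h1'' : Nat.choose (2 * n - k) k * (Nat.factorial k * Nat.factorial (2 * n - 2 * k))
      = (2 * n - k) * Nat.factorial (2 * n - k - 1) := by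
    have h := Nat.choose_mul_factorial_mul_factorial (n := 2 * n - k) (k := k) (by omega)
    rw [show 2 * n - k - k = 2 * n - 2 * k from by omega] at h
    rw [← Nat.mul_assoc, h, hfac]
  rcases Nat.eq_zero_or_pos k with hk0 | hk0
  · subst hk0
    rw [if_neg (lt_irrefl 0), Nat.add_zero, h1'']
    congr 2
  · have h2'' : Nat.choose (2 * n - k - 1) (k - 1) *
        (Nat.factorial k * Nat.factorial (2 * n - 2 * k))
        = k * Nat.factorial (2 * n - k - 1) := by
      have h := Nat.choose_mul_factorial_mul_factorial (n := 2 * n - k - 1) (k := k - 1) (by omega)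
      rw [show 2 * n - k - 1 - (k - 1) = 2 * n - 2 * k from by omega] at h
      have hkf : Nat.factorial k = k * Nat.factorial (k - 1) := by
        conv_lhs => rw [show k = (k - 1) + 1 from by omega]
        rw [Nat.factorial_succ]
        congr 1
        omega
      calc Nat.choose (2 * n - k - 1) (k - 1) * (Nat.factorial k * Nat.factorial (2 * n - 2 * k))
          = k * (Nat.choose (2 * n - k - 1) (k - 1) * Nat.factorial (k - 1) *
              Nat.factorial (2 * n - 2 * k)) := by rw [hkf]; ring
        _ = k * Nat.factorial (2 * n - k - 1) := by rw [h]
    rw [if_pos hk0, Nat.add_mul, h1'', h2'']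
    calc 2 * n * Nat.factorial (2 * n - k - 1)
        = ((2 * n - k) + k) * Nat.factorial (2 * n - k - 1) := by
          rw [show (2 * n - k) + k = 2 * n from by omega]
      _ = (2 * n - k) * Nat.factorial (2 * n - k - 1) +
          k * Nat.factorial (2 * n - k - 1) := by ring

theorem facq (a : ℕ) : ((Nat.factorial (a+1) : ℕ) : ℚ) = ((a:ℚ)+1) * (Nat.factorial a : ℚ) := by
  push_cast [Nat.factorial_succ]; ring

theorem tQ_fac (n k : Nat) (h1 : 1 ≤ n) (hk : k ≤ n) :
    tQ n k = (-1)^k * (2*(n:ℚ) * (Nat.factorial (2*n - k - 1) : ℚ))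
      * (Nat.factorial (n - k) : ℚ)
      / ((Nat.factorial k : ℚ) * (Nat.factorial (2*n - 2*k) : ℚ)) := by
  have key := menage_coeff_key n k h1 hk
  have keyQ : 2*(n:ℚ)*(Nat.factorial (2*n - k - 1) : ℚ)
      = (mC n k : ℚ) * ((Nat.factorial k : ℚ) * (Nat.factorial (2*n - 2*k) : ℚ)) := by
    exact_mod_cast key
  have hb : (Nat.factorial k : ℚ) ≠ 0 := by positivity
  have hc : (Nat.factorial (2*n - 2*k) : ℚ) ≠ 0 := by positivity
  unfold tQ mTerm
  push_cast
  rw [eq_div_iff (by positivity)]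
  rw [keyQ]; ring

theorem mTerm_zero (n k : Nat) (h1 : 1 ≤ n) (h : n < k) : mTerm n k = 0 := by
  unfold mTerm mC
  rw [Nat.choose_eq_zero_of_lt (by omega), if_pos (by omega), Nat.choose_eq_zero_of_lt (by omega)]
  simp

theorem tQ_zero (n k : Nat) (h1 : 1 ≤ n) (h : n < k) : tQ n k = 0 := by
  unfold tQ; rw [mTerm_zero n k h1 h]; simp

theorem mid_step (n k : Nat) (h : k + 3 ≤ n) :
    ((n:ℚ)-2) * tQ n k - (n:ℚ)*((n:ℚ)-2) * tQ (n-1) k - (n:ℚ) * tQ (n-2) k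
      = sQ n (k+1) - sQ n k := by
  obtain ⟨m, rfl⟩ : ∃ m, n = k+m+3 := ⟨n-k-3, by omega⟩
  rw [show k+m+3-1 = k+m+2 from rfl, show k+m+3-2 = k+m+1 from rfl]
  rw [tQ_fac (k+m+3) k (by omega) (by omega), tQ_fac (k+m+2) k (by omega) (by omega),
      tQ_fac (k+m+1) k (by omega) (by omega)]
  unfold sQ
  simp only [show 2*(k+m+3)-k-1 = k+2*m+5 from by omega,
    show k+m+3-k = m+3 from by omega,
    show 2*(k+m+3)-2*k = 2*m+6 from by omega,
    show 2*(k+m+2)-k-1 = k+2*m+3 from by omega,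
    show k+m+2-k = m+2 from by omega,
    show 2*(k+m+2)-2*k = 2*m+4 from by omega,
    show 2*(k+m+1)-k-1 = k+2*m+1 from by omega,
    show k+m+1-k = m+1 from by omega,
    show 2*(k+m+1)-2*k = 2*m+2 from by omega,
    show 2*(k+m+3)-k-4 = k+2*m+2 from by omega,
    show 2*(k+m+3)-(k+1)-4 = k+2*m+1 from by omega,
    show k+m+3-(k+1) = m+2 from by omega,
    show 2*(k+m+3)-2*(k+1) = 2*m+4 from by omega]
  have e1 : ((Nat.factorial (k+2*m+5) : ℕ) : ℚ)
      = ((k:ℚ)+2*m+5)*((k:ℚ)+2*m+4)*((k:ℚ)+2*m+3)*((k:ℚ)+2*m+2)*(Nat.factorial (k+2*m+1) : ℚ) := by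
    rw [show k+2*m+5 = (k+2*m+4)+1 from rfl, facq, show k+2*m+4 = (k+2*m+3)+1 from rfl, facq,
        show k+2*m+3 = (k+2*m+2)+1 from rfl, facq, show k+2*m+2 = (k+2*m+1)+1 from rfl, facq]
    push_cast; ring
  have e2 : ((Nat.factorial (k+2*m+3) : ℕ) : ℚ)
      = ((k:ℚ)+2*m+3)*((k:ℚ)+2*m+2)*(Nat.factorial (k+2*m+1) : ℚ) := by
    rw [show k+2*m+3 = (k+2*m+2)+1 from rfl, facq, show k+2*m+2 = (k+2*m+1)+1 from rfl, facq]
    push_cast; ring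
  have e3 : ((Nat.factorial (k+2*m+2) : ℕ) : ℚ)
      = ((k:ℚ)+2*m+2)*(Nat.factorial (k+2*m+1) : ℚ) := by
    rw [show k+2*m+2 = (k+2*m+1)+1 from rfl, facq]; push_cast; ring
  have e4 : ((Nat.factorial (2*m+6) : ℕ) : ℚ)
      = (2*(m:ℚ)+6)*(2*(m:ℚ)+5)*(2*(m:ℚ)+4)*(2*(m:ℚ)+3)*(Nat.factorial (2*m+2) : ℚ) := by
    rw [show 2*m+6 = (2*m+5)+1 from rfl, facq, show 2*m+5 = (2*m+4)+1 from rfl, facq,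
        show 2*m+4 = (2*m+3)+1 from rfl, facq, show 2*m+3 = (2*m+2)+1 from rfl, facq]
    push_cast; ring
  have e5 : ((Nat.factorial (2*m+4) : ℕ) : ℚ)
      = (2*(m:ℚ)+4)*(2*(m:ℚ)+3)*(Nat.factorial (2*m+2) : ℚ) := by
    rw [show 2*m+4 = (2*m+3)+1 from rfl, facq, show 2*m+3 = (2*m+2)+1 from rfl, facq]
    push_cast; ring
  have e6 : ((Nat.factorial (m+3) : ℕ) : ℚ)
      = ((m:ℚ)+3)*((m:ℚ)+2)*(Nat.factorial (m+1) : ℚ) := by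
    rw [show m+3 = (m+2)+1 from rfl, facq, show m+2 = (m+1)+1 from rfl, facq]
    push_cast; ring
  have e7 : ((Nat.factorial (m+2) : ℕ) : ℚ)
      = ((m:ℚ)+2)*(Nat.factorial (m+1) : ℚ) := by
    rw [show m+2 = (m+1)+1 from rfl, facq]; push_cast; ring
  have e8 : ((Nat.factorial (k+1) : ℕ) : ℚ) = ((k:ℚ)+1)*(Nat.factorial k : ℚ) := facq k
  rw [e1, e2, e3, e4, e5, e6, e7, e8]
  have ha : (Nat.factorial (k+2*m+1) : ℚ) ≠ 0 := by positivity
  have hb : (Nat.factorial k : ℚ) ≠ 0 := by positivity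
  have hc : (Nat.factorial (2*m+2) : ℚ) ≠ 0 := by positivity
  have hd : (Nat.factorial (m+1) : ℚ) ≠ 0 := by positivity
  push_cast
  field_simp
  ring

theorem boundary (j : Nat) :
    sQ (j+5) (j+3)
      + (((j:ℚ)+3) * tQ (j+5) (j+3) - (((j:ℚ)+5)*((j:ℚ)+3)) * tQ (j+4) (j+3) - ((j:ℚ)+5) * tQ (j+3) (j+3))
      + (((j:ℚ)+3) * tQ (j+5) (j+4) - (((j:ℚ)+5)*((j:ℚ)+3)) * tQ (j+4) (j+4) - ((j:ℚ)+5) * tQ (j+3) (j+4))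
      + (((j:ℚ)+3) * tQ (j+5) (j+5) - (((j:ℚ)+5)*((j:ℚ)+3)) * tQ (j+4) (j+5) - ((j:ℚ)+5) * tQ (j+3) (j+5))
      = -4 * (-1)^(j+5) := by
  rw [tQ_fac (j+5) (j+3) (by omega) (by omega), tQ_fac (j+4) (j+3) (by omega) (by omega),
      tQ_fac (j+3) (j+3) (by omega) (by omega), tQ_fac (j+5) (j+4) (by omega) (by omega),
      tQ_fac (j+4) (j+4) (by omega) (by omega), tQ_fac (j+5) (j+5) (by omega) (by omega),
      tQ_zero (j+3) (j+4) (by omega) (by omega), tQ_zero (j+3) (j+5) (by omega) (by omega),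
      tQ_zero (j+4) (j+5) (by omega) (by omega)]
  unfold sQ
  simp only [show 2*(j+5)-(j+3)-1 = j+6 from by omega,
    show (j+5)-(j+3) = 2 from by omega,
    show 2*(j+5)-2*(j+3) = 4 from by omega,
    show 2*(j+4)-(j+3)-1 = j+4 from by omega,
    show (j+4)-(j+3) = 1 from by omega,
    show 2*(j+4)-2*(j+3) = 2 from by omega,
    show 2*(j+3)-(j+3)-1 = j+2 from by omega,
    show (j+3)-(j+3) = 0 from by omega,
    show 2*(j+3)-2*(j+3) = 0 from by omega,
    show 2*(j+5)-(j+4)-1 = j+5 from by omega,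
    show (j+5)-(j+4) = 1 from by omega,
    show 2*(j+5)-2*(j+4) = 2 from by omega,
    show 2*(j+4)-(j+4)-1 = j+3 from by omega,
    show (j+4)-(j+4) = 0 from by omega,
    show 2*(j+4)-2*(j+4) = 0 from by omega,
    show 2*(j+5)-(j+5)-1 = j+4 from by omega,
    show (j+5)-(j+5) = 0 from by omega,
    show 2*(j+5)-2*(j+5) = 0 from by omega,
    show 2*(j+5)-(j+3)-4 = j+3 from by omega]
  have e1 : ((Nat.factorial (j+6) : ℕ) : ℚ)
      = ((j:ℚ)+6)*((j:ℚ)+5)*((j:ℚ)+4)*((j:ℚ)+3)*(Nat.factorial (j+2) : ℚ) := by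
    rw [show j+6 = (j+5)+1 from rfl, facq, show j+5 = (j+4)+1 from rfl, facq,
        show j+4 = (j+3)+1 from rfl, facq, show j+3 = (j+2)+1 from rfl, facq]
    push_cast; ring
  have e2 : ((Nat.factorial (j+5) : ℕ) : ℚ)
      = ((j:ℚ)+5)*((j:ℚ)+4)*((j:ℚ)+3)*(Nat.factorial (j+2) : ℚ) := by
    rw [show j+5 = (j+4)+1 from rfl, facq, show j+4 = (j+3)+1 from rfl, facq,
        show j+3 = (j+2)+1 from rfl, facq]
    push_cast; ring
  have e3 : ((Nat.factorial (j+4) : ℕ) : ℚ)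
      = ((j:ℚ)+4)*((j:ℚ)+3)*(Nat.factorial (j+2) : ℚ) := by
    rw [show j+4 = (j+3)+1 from rfl, facq, show j+3 = (j+2)+1 from rfl, facq]
    push_cast; ring
  have e4 : ((Nat.factorial (j+3) : ℕ) : ℚ) = ((j:ℚ)+3)*(Nat.factorial (j+2) : ℚ) := by
    rw [show j+3 = (j+2)+1 from rfl, facq]; push_cast; ring
  rw [e1, e2, e3, e4]
  have hE : (Nat.factorial (j+2) : ℚ) ≠ 0 := by positivity
  norm_num [Nat.factorial]
  field_simp
  ring

theorem sum_tQ (m : Nat) (h1 : 1 ≤ m) (M : Nat) (hM : m + 1 ≤ M) :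
    ((mT m : Int) : ℚ) = ∑ k ∈ Finset.range M, tQ m k := by
  unfold mT tQ
  push_cast
  apply Finset.sum_subset (by intro x hx; simp only [Finset.mem_range] at *; omega)
  intro x _ hx
  rw [Finset.mem_range, not_lt] at hx
  rw [mTerm_zero m x h1 (by omega)]
  simp

theorem Grec (j : Nat) :
    ((j:Int)+3) * mT (j+5)
      = ((j:Int)+5)*((j:Int)+3) * mT (j+4) + ((j:Int)+5) * mT (j+3) - 4*(-1)^(j+5) := by
  have key : ((j:ℚ)+3) * ((mT (j+5) : Int) : ℚ)
      - (((j:ℚ)+5)*((j:ℚ)+3)) * ((mT (j+4) : Int) : ℚ)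
      - ((j:ℚ)+5) * ((mT (j+3) : Int) : ℚ) = -4 * (-1)^(j+5) := by
    rw [sum_tQ (j+5) (by omega) (j+6) (by omega), sum_tQ (j+4) (by omega) (j+6) (by omega),
        sum_tQ (j+3) (by omega) (j+6) (by omega)]
    rw [Finset.mul_sum, Finset.mul_sum, Finset.mul_sum, ← Finset.sum_sub_distrib,
        ← Finset.sum_sub_distrib]
    rw [Finset.sum_range_succ, Finset.sum_range_succ, Finset.sum_range_succ]
    have hmid : ∀ k ∈ Finset.range (j+3),
        ((j:ℚ)+3) * tQ (j+5) k - (((j:ℚ)+5)*((j:ℚ)+3)) * tQ (j+4) k - ((j:ℚ)+5) * tQ (j+3) k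
        = sQ (j+5) (k+1) - sQ (j+5) k := by
      intro k hk
      rw [Finset.mem_range] at hk
      have h := mid_step (j+5) k (by omega)
      rw [show j+5-1 = j+4 from rfl, show j+5-2 = j+3 from rfl] at h
      have hcast : ((j:ℚ)+5) = (((j+5 : Nat)):ℚ) := by push_cast; ring
      have hcast3 : ((j:ℚ)+3) = ((j:ℚ)+5) - 2 := by ring
      rw [hcast3, hcast]
      convert h using 2
    rw [Finset.sum_congr rfl hmid, Finset.sum_range_sub (f := sQ (j+5))]
    have hs0 : sQ (j+5) 0 = 0 := by unfold sQ; simp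
    rw [hs0, sub_zero]
    have hb := boundary j
    linarith [hb]
  have keyZ : ((j:Int)+3) * mT (j+5) - (((j:Int)+5)*((j:Int)+3)) * mT (j+4)
      - ((j:Int)+5) * mT (j+3) = -4*(-1)^(j+5) := by
    exact_mod_cast key
  linarith [keyZ]

theorem mT_rec (j : Nat) :
    mT (j+7) = ((j:Int)+7) * mT (j+6) + 2 * mT (j+5) - ((j:Int)+3) * mT (j+4) - mT (j+3) := by
  have h1 := Grec (j+2)
  have h2 := Grec j
  push_cast at h1
  apply mul_left_cancel₀ (show ((j:Int)+5) ≠ 0 from by positivity)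
  rw [show (j+2)+5 = j+7 from rfl, show (j+2)+4 = j+6 from rfl, show (j+2)+3 = j+5 from rfl] at h1
  linear_combination h1 - h2

theorem G_eq_mT (m : Nat) (h : 3 ≤ m) : G m = mT m := by
  induction m using Nat.strong_induction_on with
  | _ m ih =>
    match m, h with
    | 3, _ => decide
    | 4, _ => decide
    | 5, _ => decide
    | 6, _ => decide
    | (j+7), _ =>
      have hG : G (j+7) = (((j+2:Nat) : Int)+5) * G (j+6) + 2 * G (j+5)
          - (((j+2:Nat) : Int)+1) * G (j+4) - G (j+3) := rfl
      rw [hG, ih (j+6) (by omega) (by omega), ih (j+5) (by omega) (by omega),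
          ih (j+4) (by omega) (by omega), ih (j+3) (by omega) (by omega), mT_rec j]
      push_cast
      ring

theorem coeff_eq (n : Int) (k : Nat) (h3 : 3 ≤ n) (hk : (k : Int) ≤ n) :
    PySem.Int.floordiv (2 * n * pyfac (2 * n - (k : Int) - 1))
        (pyfac (k : Int) * pyfac (2 * n - 2 * (k : Int)))
      = (mC n.toNat k : Int) := by
  obtain ⟨m, rfl⟩ : ∃ m : Nat, n = (m : Int) := ⟨n.toNat, by omega⟩
  have hm1 : 1 ≤ m := by exact_mod_cast (by omega : (1 : Int) ≤ (m : Int))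
  have hkm : k ≤ m := by exact_mod_cast hk
  have e1 : (2 * (m : Int) - (k : Int) - 1).toNat = 2 * m - k - 1 := by omega
  have e2 : ((k : Int)).toNat = k := by omega
  have e3 : (2 * (m : Int) - 2 * (k : Int)).toNat = 2 * m - 2 * k := by omega
  have e4 : ((m : Int)).toNat = m := by omega
  have hposN : 0 < Nat.factorial k * Nat.factorial (2 * m - 2 * k) := by positivity
  simp only [pyfac, e1, e2, e3, e4]
  rw [show ((Nat.factorial k : Int) * (Nat.factorial (2 * m - 2 * k) : Int))
        = ((Nat.factorial k * Nat.factorial (2 * m - 2 * k) : Nat) : Int) by push_cast; ring]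
  rw [PySem.Int.floordiv_eq_ediv_of_pos (by exact_mod_cast hposN)]
  rw [show (2 * (m : Int) * ((Nat.factorial (2 * m - k - 1) : Nat) : Int))
        = ((2 * m * Nat.factorial (2 * m - k - 1) : Nat) : Int) by push_cast; ring]
  rw [menage_coeff_key m k hm1 hkm]
  push_cast
  rw [mul_comm]
  exact Int.mul_ediv_cancel_left _ (by exact_mod_cast hposN.ne')

theorem foldA (n : Int) (h3 : 3 ≤ n) (m : Nat) (hm : (m : Int) ≤ n + 1) :
    (List.range m).foldl (fun (total : Int) (j : Nat) =>
        let k : Int := 0 + (j : Int)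
        if 2 * n - k = 0 then total
        else
          let coeff := PySem.Int.floordiv (2 * n * pyfac (2 * n - k - 1))
                         (pyfac k * pyfac (2 * n - 2 * k))
          let term := coeff * pyfac (n - k)
          if PySem.Int.mod k 2 = 0 then total + term else total - term) 0
    = ∑ k ∈ Finset.range m, mTerm n.toNat k := by
  induction m with
  | zero => simp
  | succ m ih =>
    have hm' : (m : Int) ≤ n + 1 := by push_cast at hm ⊢; omega
    have hmn : (m : Int) ≤ n := by push_cast at hm; omega
    rw [List.range_succ, List.foldl_append, ih hm', Finset.sum_range_succ]
    simp only [List.foldl_cons, List.foldl_nil, zero_add]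
    rw [if_neg (show ¬ (2 * n - (m : Int) = 0) from by omega)]
    rw [coeff_eq n m h3 hmn]
    have hfk : pyfac ((n : Int) - (m : Int)) = (Nat.factorial (n.toNat - m) : Int) := by
      unfold pyfac
      rw [show ((n : Int) - (m : Int)).toNat = n.toNat - m from by omega]
    rw [hfk]
    rw [show PySem.Int.mod ((m : Int)) 2 = ((m % 2 : Nat) : Int) from by
      exact_mod_cast PySem.Int.mod_natCast m 2]
    unfold mTerm
    rcases Nat.even_or_odd m with he | ho
    · have h2 : m % 2 = 0 := Nat.even_iff.mp he
      rw [h2, Even.neg_one_pow he]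
      norm_num
    · have h2 : m % 2 = 1 := Nat.odd_iff.mp ho
      rw [h2, Odd.neg_one_pow ho]
      norm_num
      ring

theorem foldB (m : Nat) :
    (List.range m).foldl (fun (st : Int × Int × Int × Int) (j : Nat) =>
        let i : Int := 5 + (j : Int)
        (st.2.1, st.2.2.1, st.2.2.2,
         i * st.2.2.2 + 2 * st.2.2.1 - (i - 4) * st.2.1 - st.1))
      (-1, 0, 1, 2)
    = (G (m+1), G (m+2), G (m+3), G (m+4)) := by
  induction m with
  | zero => simp [G]
  | succ m ih =>
    rw [List.range_succ, List.foldl_append, ih]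
    simp only [List.foldl_cons, List.foldl_nil]
    have hG : G (m+5) = ((m:Int)+5) * G (m+4) + 2 * G (m+3) - ((m:Int)+1) * G (m+2) - G (m+1) := rfl
    refine Prod.ext rfl (Prod.ext rfl (Prod.ext rfl ?_))
    simp only []
    rw [show m+1+4 = m+5 from rfl, hG]
    ring

theorem main_glue : ∀ (n : Int), menage n = menage_alt n := by
  intro n
  unfold menage menage_alt
  by_cases h : n < 3
  · rw [if_pos h, if_pos h]
  · rw [if_neg h, if_neg h]
    have h3 : 3 ≤ n := by omega
    rw [PySem.List.pyRange_one, List.foldl_map]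
    rw [foldA n h3 (n + 1 - 0).toNat (by omega)]
    rw [show (n + 1 - 0).toNat = n.toNat + 1 from by omega]
    have hA : (∑ k ∈ Finset.range (n.toNat + 1), mTerm n.toNat k) = mT n.toNat := rfl
    rw [hA]
    by_cases h4 : n = 3
    · subst h4
      rw [if_pos rfl]
      decide
    · rw [if_neg h4]
      rw [PySem.List.pyRange_one, List.foldl_map]
      have hfb := foldB ((n + 1 - 5).toNat)
      rw [show ((n + 1 - 5).toNat) + 4 = n.toNat from by omega] at hfb
      rw [hfb]
      exact (G_eq_mT n.toNat (by omega)).symm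

-- ===== VERDICT (by name: the statement is the Claim_ definition above) =====
theorem menage_spec : Claim_equal_menage := by
  intro n _
  unfold Spec_menage
  exact main_glue n
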